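-- pv_equiv track=rewrite | github.com/adlerberg0/EPAM-training | hw7/hw3.py | custom_sum
-- ===== SOURCE A (Python) =====
-- SCORE_FOR_X = 1
--
-- SCORE_FOR_O = 10
--
-- SCORE_FOR_EMPTY_CELL = -300  # should be negative
--
-- def custom_sum(board_data: list) -> int:
--     score_sum = 0
--     for item in board_data:
--         if item == "-":
--             score_sum += SCORE_FOR_EMPTY_CELL
--         elif item == "o":
--             score_sum += SCORE_FOR_O
--         elif item == "x":
--             score_sum += SCORE_FOR_X
--     return score_sum
-- ===== SOURCE B (Python) =====
-- import collections
--
-- SCORE_FOR_X = 1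
-- SCORE_FOR_O = 10
-- SCORE_FOR_EMPTY_CELL = -300  # should be negative
--
--
-- def custom_sum(board_data: list) -> int:
--     counts = collections.Counter(board_data)
--     return (counts["x"] * SCORE_FOR_X
--             + counts["o"] * SCORE_FOR_O
--             + counts["-"] * SCORE_FOR_EMPTY_CELL)
-- ===== Notes on version B (the rewrite author's own statement) =====
-- stated objective: idiomatic
-- what changed: Replaces the per-element branch-and-accumulate loop with a single Counter frequency pass followed by one closed-form arithmetic expression over the three tallies.
import Mathlib
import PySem

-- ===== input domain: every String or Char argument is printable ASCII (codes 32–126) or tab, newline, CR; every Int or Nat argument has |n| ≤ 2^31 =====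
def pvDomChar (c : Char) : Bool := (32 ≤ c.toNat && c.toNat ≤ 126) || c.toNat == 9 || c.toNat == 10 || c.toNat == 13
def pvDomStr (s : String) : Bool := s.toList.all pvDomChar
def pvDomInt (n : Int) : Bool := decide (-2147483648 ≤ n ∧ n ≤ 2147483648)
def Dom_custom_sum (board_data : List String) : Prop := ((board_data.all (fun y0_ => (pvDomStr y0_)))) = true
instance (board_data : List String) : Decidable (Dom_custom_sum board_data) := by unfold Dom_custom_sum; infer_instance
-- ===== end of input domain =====

-- B replaces A's per-element branch-and-accumulate loop with one Counter pass and a closed-form arithmetic expression (idiomatic).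

-- ===== PORT A =====
def SCORE_FOR_X : Int := 1
def SCORE_FOR_O : Int := 10
def SCORE_FOR_EMPTY_CELL : Int := -300

def custom_sum (board_data : List String) : Int :=
  board_data.foldl (fun score_sum item =>
    if item == "-" then score_sum + SCORE_FOR_EMPTY_CELL
    else if item == "o" then score_sum + SCORE_FOR_O
    else if item == "x" then score_sum + SCORE_FOR_X
    else score_sum) 0

-- ===== PORT B =====
def custom_sum_alt (board_data : List String) : Int :=
  let counts := PySem.Dict.counter board_data
  counts.getD "x" 0 * SCORE_FOR_X
    + counts.getD "o" 0 * SCORE_FOR_O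
    + counts.getD "-" 0 * SCORE_FOR_EMPTY_CELL

-- ===== PRECONDITION & SPEC =====
def Spec_custom_sum (board_data : List String) (out : Int) : Prop := out = custom_sum_alt board_data
instance (board_data : List String) (out : Int) : Decidable (Spec_custom_sum board_data out) := by unfold Spec_custom_sum; infer_instance

-- ===== CLAIM (what is proved, stated in full; the proofs are below) =====
def Claim_equal_custom_sum : Prop := ∀ (board_data : List String), Dom_custom_sum board_data → Spec_custom_sum board_data (custom_sum board_data)

-- ===== LEMMAS AND PROOFS =====
-- A's loop computes acc + (weighted counts): the invariant for the fold.
theorem custom_sum_foldl_counts (board_data : List String) (acc : Int) :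
    board_data.foldl (fun score_sum item =>
      if item == "-" then score_sum + SCORE_FOR_EMPTY_CELL
      else if item == "o" then score_sum + SCORE_FOR_O
      else if item == "x" then score_sum + SCORE_FOR_X
      else score_sum) acc
    = acc + (board_data.count "x") * SCORE_FOR_X
          + (board_data.count "o") * SCORE_FOR_O
          + (board_data.count "-") * SCORE_FOR_EMPTY_CELL := by
  induction board_data generalizing acc with
  | nil => simp
  | cons h t ih =>
    simp only [List.foldl_cons, List.count_cons, ih]
    by_cases h1 : h = "-" <;> by_cases h2 : h = "o" <;> by_cases h3 : h = "x" <;>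
      simp_all <;> ring

-- ===== VERDICT (by name: the statement is the Claim_ definition above) =====
theorem custom_sum_spec : Claim_equal_custom_sum := by
  intro board_data _
  unfold Spec_custom_sum custom_sum custom_sum_alt
  simp only [PySem.Dict.getD_counter]
  rw [custom_sum_foldl_counts]
  ring
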